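-- pv_equiv track=rewrite | github.com/brikbrik94/overlays | scripts/extract_sprite_icons.py | parse_style_vars
-- ===== SOURCE A (Python) =====
-- from typing import Dict, List
--
-- def parse_style_vars(style_text: str) -> Dict[str, str]:
--     result: Dict[str, str] = {}
--     for part in style_text.split(";"):
--         if ":" not in part:
--             continue
--         key, value = part.split(":", 1)
--         key = key.strip()
--         value = value.strip()
--         if key.startswith("--") and value:
--             result[key] = value
--     return result
-- ===== SOURCE B (Python) =====
-- def parse_style_vars(style_text):
--     # One-pass character state machine: no split() calls; buffers for key/value,
--     # a flag for "first colon seen"; flush at each ';' (and a final virtual ';').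
--     result = {}
--     key_buf = []
--     val_buf = []
--     seen_colon = False
--     for ch in style_text + ";":
--         if ch == ";":
--             if seen_colon:
--                 k = "".join(key_buf).strip()
--                 v = "".join(val_buf).strip()
--                 if k.startswith("--") and v:
--                     result[k] = v
--             key_buf = []
--             val_buf = []
--             seen_colon = False
--         elif ch == ":" and not seen_colon:
--             seen_colon = True
--         elif seen_colon:
--             val_buf.append(ch)
--         else:
--             key_buf.append(ch)
--     return result
-- ===== Notes on version B (the rewrite author's own statement) =====
-- stated objective: alternative
-- what changed: Replaced A's split-on-';' then split-on-':' passes with a single-pass character state machine that accumulates key/value buffers and flushes them at each ';'.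
import Mathlib
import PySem

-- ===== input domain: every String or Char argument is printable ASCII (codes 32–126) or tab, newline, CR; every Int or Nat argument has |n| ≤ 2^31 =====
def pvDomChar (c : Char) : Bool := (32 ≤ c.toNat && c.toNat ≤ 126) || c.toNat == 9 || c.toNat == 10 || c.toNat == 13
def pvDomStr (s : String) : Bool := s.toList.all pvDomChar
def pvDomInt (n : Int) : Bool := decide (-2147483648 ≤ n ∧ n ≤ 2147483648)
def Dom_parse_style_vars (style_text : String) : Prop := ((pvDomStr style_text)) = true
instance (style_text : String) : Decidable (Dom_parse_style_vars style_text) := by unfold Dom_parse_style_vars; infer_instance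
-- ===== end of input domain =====

-- B replaces A's split-on-';' / split-on-':' passes by a one-pass character state machine (objective: alternative, same asymptotic cost).

-- ===== PORT A =====
-- A's loop body: skip parts without ':', split at the first ':', strip both sides,
-- keep '--'-prefixed keys with non-empty values (dict overwrite keeps position).
def pvAStep (d : PySem.Dict String String) (part : String) : PySem.Dict String String :=
  if PySem.Str.isIn ":" part = false then d
  else
    let kv := (PySem.Str.splitMax? part ":" 1).getD []
    let key := PySem.Str.strip (kv.headD "")
    let value := PySem.Str.strip ((kv.drop 1).headD "")
    if PySem.Str.startswith key "--" && !(value == "") then d.insert key value else d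

def parse_style_vars (style_text : String) : List (String × String) :=
  (((PySem.Str.split? style_text ";").getD []).foldl pvAStep PySem.Dict.empty).items

-- ===== PORT B =====
-- state: (dict so far, key buffer, value buffer, seen_colon); flush at ';'
def pvStep (st : PySem.Dict String String × List Char × List Char × Bool) (c : Char) :
    PySem.Dict String String × List Char × List Char × Bool :=
  let d := st.1; let kb := st.2.1; let vb := st.2.2.1; let sc := st.2.2.2
  if c = ';' then
    (if sc then
       let k := PySem.Str.strip (String.ofList kb)
       let v := PySem.Str.strip (String.ofList vb)
       if PySem.Str.startswith k "--" && !(v == "") then d.insert k v else d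
     else d, [], [], false)
  else if c = ':' && !sc then (d, kb, vb, true)
  else if sc then (d, kb, vb ++ [c], sc)
  else (d, kb ++ [c], vb, sc)

def parse_style_vars_alt (style_text : String) : List (String × String) :=
  (((style_text.toList ++ [';']).foldl pvStep (PySem.Dict.empty, [], [], false)).1).items

-- ===== PRECONDITION & SPEC =====
def Spec_parse_style_vars (style_text : String) (out : List (String × String)) : Prop := out = parse_style_vars_alt style_text
instance (style_text : String) (out : List (String × String)) : Decidable (Spec_parse_style_vars style_text out) := by unfold Spec_parse_style_vars; infer_instance

-- ===== CLAIM (what is proved, stated in full; the proofs are below) =====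
def Claim_equal_parse_style_vars : Prop := ∀ (style_text : String), Dom_parse_style_vars style_text → Spec_parse_style_vars style_text (parse_style_vars style_text)

-- ===== LEMMAS AND PROOFS =====

-- canonical single-char split on ';' with an accumulated prefix of the first chunk
def pvSplit (pre : List Char) : List Char → List (List Char)
  | [] => [pre]
  | a :: as => if a = ';' then pre :: pvSplit [] as else pvSplit (pre ++ [a]) as

-- canonical per-segment action, over char lists; both ports reduce to a fold of this
def pvSeg (d : PySem.Dict String String) (part : List Char) : PySem.Dict String String :=
  if ':' ∈ part then
    let k := PySem.Chars.strip (part.takeWhile (· ≠ ':'))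
    let v := PySem.Chars.strip ((part.dropWhile (· ≠ ':')).tail)
    if PySem.Chars.startswith k ['-','-'] && !v.isEmpty then
      d.insert (String.ofList k) (String.ofList v)
    else d
  else d

theorem pvGoMax_zero : ∀ (l : List Char) (fuel : Nat) (cur : List Char) (acc : List (List Char)),
    PySem.Chars.splitOnMax.go [':'] fuel 0 l cur acc = acc.reverse ++ [cur.reverse ++ l] := by
  intro l fuel cur acc
  cases fuel with
  | zero => simp [PySem.Chars.splitOnMax.go]
  | succ f => cases l with
    | nil => simp [PySem.Chars.splitOnMax.go]
    | cons c rest => simp [PySem.Chars.splitOnMax.go]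

theorem pvGoMax_one : ∀ (l : List Char) (fuel : Nat) (cur : List Char) (acc : List (List Char)),
    l.length < fuel →
    PySem.Chars.splitOnMax.go [':'] fuel 1 l cur acc =
      if ':' ∈ l then
        acc.reverse ++ [cur.reverse ++ l.takeWhile (· ≠ ':'), (l.dropWhile (· ≠ ':')).tail]
      else acc.reverse ++ [cur.reverse ++ l] := by
  intro l
  induction l with
  | nil =>
    intro fuel cur acc h
    cases fuel with
    | zero => omega
    | succ f => simp [PySem.Chars.splitOnMax.go]
  | cons c rest ih =>
    intro fuel cur acc h
    cases fuel with
    | zero => omega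
    | succ f =>
      rw [PySem.Chars.splitOnMax.go]
      by_cases hc : c = ':'
      · subst hc
        rw [if_neg (by omega), if_pos (by simp [List.isPrefixOf])]
        simp only [List.length_cons, List.length_nil, List.drop_succ_cons, List.drop_zero,
          Nat.zero_add]
        rw [pvGoMax_zero]
        simp [List.takeWhile, List.dropWhile]
      · rw [if_neg (by omega), if_neg (by simp [List.isPrefixOf]; exact fun hh => hc hh.symm)]
        rw [ih f (c :: cur) acc (by simp at h ⊢; omega)]
        by_cases hm : ':' ∈ rest
        · simp only [List.mem_cons, hm, or_true, if_pos]
          refine congrArg (acc.reverse ++ ·) ?_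
          rw [List.takeWhile_cons, if_pos (by simp [hc]), List.dropWhile_cons,
            if_pos (by simp [hc])]
          simp
        · simp [hm, Ne.symm hc]

theorem pvMem_singleton_infix (a : Char) (l : List Char) : [a] <:+: l ↔ a ∈ l := by
  constructor
  · intro h; exact h.mem (List.mem_singleton_self a)
  · intro h
    obtain ⟨s, t, rfl⟩ := List.append_of_mem h
    exact ⟨s, t, by simp⟩

theorem pvTakeWhile_colon (kb vb : List Char) (hk : ':' ∉ kb) :
    (kb ++ ':' :: vb).takeWhile (· ≠ ':') = kb := by
  induction kb with
  | nil => simp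
  | cons a as ih =>
    simp at hk
    rw [List.cons_append, List.takeWhile_cons, if_pos (by simp [Ne.symm hk.1])]
    rw [ih hk.2]

theorem pvDropWhile_colon (kb vb : List Char) (hk : ':' ∉ kb) :
    (kb ++ ':' :: vb).dropWhile (· ≠ ':') = ':' :: vb := by
  induction kb with
  | nil => simp
  | cons a as ih =>
    simp at hk
    rw [List.cons_append, List.dropWhile_cons, if_pos (by simp [Ne.symm hk.1])]
    exact ih hk.2

theorem pvAStep_eq (d : PySem.Dict String String) (part : String) :
    pvAStep d part = pvSeg d part.toList := by
  by_cases hm : ':' ∈ part.toList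
  · have hin : PySem.Chars.isIn [':'] part.toList = true :=
      (PySem.Chars.isIn_iff_infix _ _).mpr ((pvMem_singleton_infix _ _).mpr hm)
    have hsm : PySem.Str.splitMax? part ":" 1 =
        some [String.ofList (part.toList.takeWhile (· ≠ ':')),
              String.ofList ((part.toList.dropWhile (· ≠ ':')).tail)] := by
      simp [PySem.Str.splitMax?, PySem.Chars.splitMax?, PySem.Chars.splitOnMax]
      rw [pvGoMax_one _ _ _ _ (by simp)]
      simp [hm]
    simp only [pvAStep, hsm, pvSeg]
    simp [hin, hm, PySem.Str.strip, PySem.Str.startswith, PySem.Chars.startswith]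
  · have hin : PySem.Chars.isIn [':'] part.toList = false := by
      rw [PySem.Chars.isIn_eq_false_iff]
      exact fun h => hm ((pvMem_singleton_infix _ _).mp h)
    simp [pvAStep, hin, pvSeg, hm]

theorem pvGo_spec : ∀ (l : List Char) (fuel : Nat) (cur : List Char) (acc : List (List Char)),
    l.length < fuel →
    PySem.Chars.splitOn.go [';'] fuel l cur acc = acc.reverse ++ pvSplit cur.reverse l := by
  intro l
  induction l with
  | nil =>
    intro fuel cur acc h
    cases fuel with
    | zero => omega
    | succ f => simp [PySem.Chars.splitOn.go, pvSplit]
  | cons c rest ih =>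
    intro fuel cur acc h
    cases fuel with
    | zero => omega
    | succ f =>
      rw [PySem.Chars.splitOn.go]
      by_cases hc : c = ';'
      · subst hc
        rw [if_pos (by simp [List.isPrefixOf])]
        simp only [List.length_cons, List.length_nil, List.drop_succ_cons, List.drop_zero,
          Nat.zero_add]
        rw [ih f [] (cur.reverse :: acc) (by simp at h ⊢; omega)]
        simp [pvSplit]
      · rw [if_neg (by simp [List.isPrefixOf]; exact fun hh => hc hh.symm)]
        rw [ih f (c :: cur) acc (by simp at h ⊢; omega)]
        simp [pvSplit, hc]

theorem pvSplitOn_eq (l : List Char) : PySem.Chars.splitOn l [';'] = pvSplit [] l := by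
  rw [PySem.Chars.splitOn, pvGo_spec l (l.length + 1) [] [] (by omega)]
  simp

theorem pvA_eq (s : String) :
    parse_style_vars s = ((pvSplit [] s.toList).foldl pvSeg PySem.Dict.empty).items := by
  have hs : PySem.Str.split? s ";" = some ((pvSplit [] s.toList).map String.ofList) := by
    simp [PySem.Str.split?, PySem.Chars.split?, pvSplitOn_eq]
  rw [parse_style_vars, hs]
  simp only [Option.getD_some, List.foldl_map]
  congr 1
  apply PySem.List.foldl_congr_mem
  intro d p hp
  rw [pvAStep_eq]
  simp

-- the full current segment represented by B's buffers
def pvCur (kb vb : List Char) (sc : Bool) : List Char := if sc then kb ++ ':' :: vb else kb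

theorem pvFlush_eq (d : PySem.Dict String String) (kb vb : List Char) (sc : Bool)
    (hk : ':' ∉ kb) :
    (pvStep (d, kb, vb, sc) ';').1 = pvSeg d (pvCur kb vb sc) := by
  cases sc with
  | false =>
    simp [pvStep, pvCur, pvSeg, hk]
  | true =>
    have hmem : ':' ∈ kb ++ ':' :: vb := by simp
    simp only [pvStep, pvCur, if_true, pvSeg, if_pos hmem,
      pvTakeWhile_colon kb vb hk, pvDropWhile_colon kb vb hk]
    simp [PySem.Str.strip, PySem.Str.startswith, PySem.Chars.startswith]

theorem pvB_main : ∀ (l : List Char) (d : PySem.Dict String String) (kb vb : List Char)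
    (sc : Bool), ':' ∉ kb → (sc = false → vb = []) →
    ((l ++ [';']).foldl pvStep (d, kb, vb, sc)).1 =
      (pvSplit (pvCur kb vb sc) l).foldl pvSeg d := by
  intro l
  induction l with
  | nil =>
    intro d kb vb sc hk hv
    simp only [List.nil_append, List.foldl_cons, List.foldl_nil, pvSplit]
    exact pvFlush_eq d kb vb sc hk
  | cons c rest ih =>
    intro d kb vb sc hk hv
    simp only [List.cons_append, List.foldl_cons]
    by_cases hc : c = ';'
    · subst hc
      have : pvStep (d, kb, vb, sc) ';' = (pvSeg d (pvCur kb vb sc), [], [], false) := by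
        rw [Prod.ext_iff]
        exact ⟨pvFlush_eq d kb vb sc hk, by simp [pvStep]⟩
      rw [this, ih _ [] [] false (by simp) (fun _ => rfl)]
      simp [pvSplit, pvCur]
    · by_cases hcol : c = ':'
      · subst hcol
        cases sc with
        | false =>
          have : pvStep (d, kb, vb, false) ':' = (d, kb, vb, true) := by simp [pvStep]
          rw [this, ih d kb vb true hk (by simp)]
          simp [pvSplit, pvCur, hv rfl]
        | true =>
          have : pvStep (d, kb, vb, true) ':' = (d, kb, vb ++ [':'], true) := by
            simp [pvStep]
          rw [this, ih d kb (vb ++ [':']) true hk (by simp)]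
          simp [pvSplit, pvCur]
      · cases sc with
        | false =>
          have : pvStep (d, kb, vb, false) c = (d, kb ++ [c], vb, false) := by
            simp [pvStep, hc, hcol]
          rw [this, ih d (kb ++ [c]) vb false (by simp [hk]; exact fun h => hcol h.symm) hv]
          simp [pvSplit, pvCur, hc]
        | true =>
          have : pvStep (d, kb, vb, true) c = (d, kb, vb ++ [c], true) := by
            simp [pvStep, hc, hcol]
          rw [this, ih d kb (vb ++ [c]) true hk (by simp)]
          simp [pvSplit, pvCur, hc]

-- ===== VERDICT (by name: the statement is the Claim_ definition above) =====
theorem parse_style_vars_spec : Claim_equal_parse_style_vars := by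
  intro s _hDom
  unfold Spec_parse_style_vars
  rw [pvA_eq, parse_style_vars_alt,
    pvB_main s.toList PySem.Dict.empty [] [] false (by simp) (fun _ => rfl)]
  rfl
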